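-- pv_equiv track=rewrite | github.com/societe-generale/aikit | aikit/transformers/text.py | _retrieve_all_rolling_string_parts
-- ===== SOURCE A (Python) =====
-- def _retrieve_all_rolling_string_parts(string, ngram=4):
--     res = []
--     nb_split = len(string) // ngram
--     for k in range(ngram):
--
--         temp_res = [string[(k + (ngram * i)) : (k + (ngram * (i + 1)))] for i in range(nb_split)]
--         temp_res = [r for r in temp_res if len(r) == ngram]
--
--         res.append(temp_res)
--     return res
-- ===== SOURCE B (Python) =====
-- def _retrieve_all_rolling_string_parts(string, ngram=4):
--     if ngram <= 0:
--         return []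
--     windows = [string[p : p + ngram] for p in range(len(string) - ngram + 1)]
--     return [windows[k::ngram] for k in range(ngram)]
-- ===== Notes on version B (the rewrite author's own statement) =====
-- stated objective: simpler
-- what changed: B builds the list of all full-length windows in one pass and extracts each offset bucket with an extended slice windows[k::ngram], replacing A's nested offset/chunk-index loops and the trailing length filter.
import Mathlib
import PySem

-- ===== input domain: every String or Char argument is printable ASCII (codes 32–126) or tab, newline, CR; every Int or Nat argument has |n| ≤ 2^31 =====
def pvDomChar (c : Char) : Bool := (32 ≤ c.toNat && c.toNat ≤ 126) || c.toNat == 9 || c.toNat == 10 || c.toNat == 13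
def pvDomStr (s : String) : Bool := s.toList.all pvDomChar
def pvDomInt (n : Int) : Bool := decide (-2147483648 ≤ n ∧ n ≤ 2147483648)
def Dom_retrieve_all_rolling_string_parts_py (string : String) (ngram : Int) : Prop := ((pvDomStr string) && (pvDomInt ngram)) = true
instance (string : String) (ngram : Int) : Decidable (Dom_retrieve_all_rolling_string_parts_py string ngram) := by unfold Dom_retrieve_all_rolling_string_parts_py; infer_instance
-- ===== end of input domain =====

-- B builds all full-length windows in one pass and extracts each offset bucket with an extended
-- slice windows[k::ngram] (objective: simpler); A's nested offset/chunk loops and length filter disappear.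


-- ===== PORT A =====
def retrieve_all_rolling_string_parts_py (string : String) (ngram : Int) : List (List String) :=
  let nb_split := PySem.Int.floordiv (PySem.Str.len string) ngram
  (PySem.List.pyRange 0 ngram 1).foldl (fun res k =>
    let temp_res := (PySem.List.pyRange 0 nb_split 1).map
      (fun i => PySem.Str.slice string (some (k + ngram * i)) (some (k + ngram * (i + 1))))
    let temp_res2 := temp_res.filter (fun r => PySem.Str.len r == ngram)
    res ++ [temp_res2]) []

-- ===== PORT B =====
def retrieve_all_rolling_string_parts_py_alt (string : String) (ngram : Int) : List (List String) :=
  if ngram ≤ 0 then []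
  else
  let windows := (PySem.List.pyRange 0 (PySem.Str.len string - ngram + 1) 1).map
    (fun p => PySem.Str.slice string (some p) (some (p + ngram)))
  (PySem.List.pyRange 0 ngram 1).map
    (fun k => (PySem.List.slice? windows (some k) none ngram).getD [])

-- ===== PRECONDITION & SPEC =====
-- Pre_ excludes only ngram = 0, where Python A raises ZeroDivisionError (len(string) // 0).
def Pre_retrieve_all_rolling_string_parts_py (string : String) (ngram : Int) : Prop := ngram ≠ 0
instance (string : String) (ngram : Int) : Decidable (Pre_retrieve_all_rolling_string_parts_py string ngram) := by unfold Pre_retrieve_all_rolling_string_parts_py; infer_instance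
def pvWitness_retrieve_all_rolling_string_parts_py : String × Int := ("abcdefg", 3)

def Spec_retrieve_all_rolling_string_parts_py (string : String) (ngram : Int) (out : List (List String)) : Prop := out = retrieve_all_rolling_string_parts_py_alt string ngram
instance (string : String) (ngram : Int) (out : List (List String)) : Decidable (Spec_retrieve_all_rolling_string_parts_py string ngram out) := by unfold Spec_retrieve_all_rolling_string_parts_py; infer_instance

-- ===== CLAIM (what is proved, stated in full; the proofs are below) =====
def Claim_equal_retrieve_all_rolling_string_parts_py : Prop := ∀ (string : String) (ngram : Int), Dom_retrieve_all_rolling_string_parts_py string ngram → Pre_retrieve_all_rolling_string_parts_py string ngram → Spec_retrieve_all_rolling_string_parts_py string ngram (retrieve_all_rolling_string_parts_py string ngram)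

-- ===== LEMMAS AND PROOFS =====

theorem pv_len_slice_beq (s : String) (a n : Int) (ha : 0 ≤ a) (hn : 0 < n) :
    (PySem.Str.len (PySem.Str.slice s (some a) (some (a + n))) == n) =
      decide (a + n ≤ (s.toList.length : Int)) := by
  have hlen : (PySem.Str.slice s (some a) (some (a + n))).toList.length
      = PySem.List.clampIdx s.toList.length (a + n) - PySem.List.clampIdx s.toList.length a := by
    rw [PySem.Str.toList_slice, PySem.Chars.slice_eq_listSlice, PySem.List.length_slice]
  have hca : (PySem.List.clampIdx s.toList.length a : Nat) = min a.toNat s.toList.length := by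
    simp only [PySem.List.clampIdx, if_neg (by omega : ¬ a < 0)]
  have hcb : (PySem.List.clampIdx s.toList.length (a + n) : Nat) = min (a + n).toNat s.toList.length := by
    simp only [PySem.List.clampIdx, if_neg (by omega : ¬ a + n < 0)]
  simp only [PySem.Str.len, hlen, hca, hcb]
  rw [Bool.beq_eq_decide_eq, decide_eq_decide]
  omega

theorem pv_filter_lt_range (c q : Nat) (h : c ≤ q) :
    (List.range q).filter (fun t => decide (t < c)) = List.range c := by
  obtain ⟨d, rfl⟩ := Nat.exists_eq_add_of_le h
  rw [List.range_add, List.filter_append]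
  rw [List.filter_eq_self.mpr (by intro a ha; simp [List.mem_range] at ha ⊢; omega)]
  rw [List.filter_eq_nil_iff.mpr (by intro a ha; simp at ha ⊢; omega)]
  simp

theorem pv_bucketA (string : String) (n k : Int) (hn : 0 < n) (hk0 : 0 ≤ k) :
    ((PySem.List.pyRange 0 (PySem.Int.floordiv (PySem.Str.len string) n) 1).map
        (fun i => PySem.Str.slice string (some (k + n * i)) (some (k + n * (i + 1))))).filter
        (fun r => PySem.Str.len r == n)
    = (List.range (PySem.Int.floordiv ((string.toList.length : Int) - k) n).toNat).map
        (fun (j : Nat) => PySem.Str.slice string (some (k + n * (j : Int))) (some (k + n * (j : Int) + n))) := by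
  have hL0 : (0:Int) ≤ (string.toList.length : Int) := by positivity
  have hcq : (PySem.Int.floordiv ((string.toList.length : Int) - k) n).toNat
      ≤ (PySem.Int.floordiv (PySem.Str.len string) n).toNat := by
    rw [PySem.Str.len_eq]
    have h1 := PySem.Int.floordiv_mul_add_mod ((string.toList.length : Int) - k) n
    have h2 := PySem.Int.mod_nonneg ((string.toList.length : Int) - k) hn
    have h3 : PySem.Int.floordiv ((string.toList.length : Int) - k) n
        ≤ PySem.Int.floordiv (string.toList.length : Int) n := by
      rw [PySem.Int.le_floordiv_iff_mul_le hn]; linarith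
    omega
  have hcmem : ∀ t : Nat, ((t : Int) < PySem.Int.floordiv ((string.toList.length : Int) - k) n
      ↔ k + n * (t : Int) + n ≤ (string.toList.length : Int)) := by
    intro t
    constructor
    · intro h
      have h' : ((t : Int) + 1) ≤ PySem.Int.floordiv ((string.toList.length : Int) - k) n := by omega
      rw [PySem.Int.le_floordiv_iff_mul_le hn] at h'
      nlinarith
    · intro h
      have h' : ((t : Int) + 1) * n ≤ (string.toList.length : Int) - k := by nlinarith
      rw [← PySem.Int.le_floordiv_iff_mul_le hn] at h'
      omega
  rw [PySem.List.pyRange_one, List.map_map, List.filter_map]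
  simp only [sub_zero]
  have hpred : ∀ t ∈ List.range (PySem.Int.floordiv (PySem.Str.len string) n).toNat,
      (((fun r => PySem.Str.len r == n) ∘ ((fun i => PySem.Str.slice string (some (k + n * i)) (some (k + n * (i + 1)))) ∘ fun t : Nat => (0 : Int) + (t : Int))) t)
      = decide (t < (PySem.Int.floordiv ((string.toList.length : Int) - k) n).toNat) := by
    intro t _
    simp only [Function.comp_apply, zero_add]
    have harg : k + n * ((t : Int) + 1) = (k + n * (t : Int)) + n := by ring
    rw [harg, pv_len_slice_beq string _ n (by positivity) hn, decide_eq_decide]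
    have := hcmem t
    omega
  rw [List.filter_congr hpred, pv_filter_lt_range _ _ hcq]
  apply List.map_congr_left
  intro t _
  simp only [Function.comp_apply, zero_add]
  congr 2
  ring


theorem pv_filterMap_some {α β : Type} (f : α → Option β) (g : α → β) (l : List α)
    (h : ∀ a ∈ l, f a = some (g a)) : l.filterMap f = l.map g := by
  induction l with
  | nil => rfl
  | cons x xs ih => simp [h x (by simp), ih (fun a ha => h a (by simp [ha]))]

theorem pv_bucketB (string : String) (n k : Int) (hn : 0 < n) (hk0 : 0 ≤ k) (hkn : k < n) :
    (PySem.List.slice?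
        ((PySem.List.pyRange 0 (PySem.Str.len string - n + 1) 1).map
          (fun p => PySem.Str.slice string (some p) (some (p + n))))
        (some k) none n).getD []
    = (List.range (PySem.Int.floordiv ((string.toList.length : Int) - k) n).toNat).map
        (fun (j : Nat) => PySem.Str.slice string (some (k + n * (j : Int))) (some (k + n * (j : Int) + n))) := by
  have hL0 : (0:Int) ≤ (string.toList.length : Int) := by positivity
  have hWlen : ((PySem.List.pyRange 0 (PySem.Str.len string - n + 1) 1).map
      (fun p => PySem.Str.slice string (some p) (some (p + n)))).length
      = ((string.toList.length : Int) - n + 1 - 0).toNat := by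
    rw [List.length_map, PySem.List.length_pyRange_one, PySem.Str.len_eq]
  simp only [PySem.List.slice?, PySem.List.sliceIndices, if_neg hn.ne',
    if_neg (not_lt.mpr hn.le), if_neg (not_lt.mpr hk0), if_pos hn, hWlen, sub_zero]
  by_cases hbig : k + n ≤ (string.toList.length : Int)
  · -- the bucket is nonempty-capable: start = k, count = (L-k) // n
    have hW : ((((string.toList.length : Int) - n + 1).toNat : Int)) = (string.toList.length : Int) - n + 1 := by
      omega
    have hmin : min k ((((string.toList.length : Int) - n + 1).toNat : Int)) = k := by
      rw [hW]; omega
    rw [hmin, if_pos (by omega), hW]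
    have hnum : (string.toList.length : Int) - n + 1 - k + n - 1 = (string.toList.length : Int) - k := by
      ring
    rw [hnum, ← PySem.Int.floordiv_eq_ediv_of_pos hn, Option.getD_some]
    apply pv_filterMap_some
    intro j hj
    rw [List.mem_range] at hj
    have hjle : ((j : Int) + 1) * n ≤ (string.toList.length : Int) - k := by
      have h1 : (j : Int) + 1 ≤ PySem.Int.floordiv ((string.toList.length : Int) - k) n := by
        have := Int.toNat_lt' (n := (j:Nat)) (m := PySem.Int.floordiv ((string.toList.length : Int) - k) n)
        omega
      rw [PySem.Int.le_floordiv_iff_mul_le hn] at h1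
      exact h1
    have hidx0 : (0:Int) ≤ k + n * (j : Int) := by positivity
    have hidxlt : (k + n * (j : Int)).toNat < ((string.toList.length : Int) - n + 1).toNat := by
      nlinarith [Int.toNat_of_nonneg hidx0, Int.toNat_of_nonneg (show (0:Int) ≤ (string.toList.length : Int) - n + 1 by omega)]
    have hcast : PySem.Str.len string - n + 1 = ((((string.toList.length : Int) - n + 1).toNat : Int)) := by
      rw [PySem.Str.len_eq, hW]
    rw [hcast, PySem.List.getElem?_map_pyRange_zero _ _ _ hidxlt,
      Int.toNat_of_nonneg hidx0]
  · -- no full window at offset k: both sides are empty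
    have hc : (PySem.Int.floordiv ((string.toList.length : Int) - k) n).toNat = 0 := by
      have : PySem.Int.floordiv ((string.toList.length : Int) - k) n < 1 := by
        rw [PySem.Int.floordiv_lt_iff_lt_mul hn]; omega
      omega
    rw [hc]
    have hWc : ((((string.toList.length : Int) - n + 1).toNat : Int)) = max ((string.toList.length : Int) - n + 1) 0 := by
      omega
    by_cases hlt : min k ((((string.toList.length : Int) - n + 1).toNat : Int)) < (((string.toList.length : Int) - n + 1).toNat : Int)
    · have hminr : min k ((((string.toList.length : Int) - n + 1).toNat : Int)) = k := by omega
      rw [if_pos hlt, hminr]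
      have hz : (((((string.toList.length : Int) - n + 1).toNat : Int)) - k + n - 1) / n = 0 := by
        apply Int.ediv_eq_zero_of_lt <;> omega
      rw [hz]
      simp
    · rw [if_neg hlt]
      simp

-- ===== VERDICT (by name: the statement is the Claim_ definition above) =====
theorem retrieve_all_rolling_string_parts_py_spec : Claim_equal_retrieve_all_rolling_string_parts_py := by
  intro string ngram _ hpre
  unfold Spec_retrieve_all_rolling_string_parts_py
  unfold Pre_retrieve_all_rolling_string_parts_py at hpre
  rcases lt_trichotomy ngram 0 with hneg | hzero | hpos
  · simp [retrieve_all_rolling_string_parts_py, retrieve_all_rolling_string_parts_py_alt,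
      if_pos (le_of_lt hneg), PySem.List.pyRange_one_eq_nil (le_of_lt hneg)]
  · exact absurd hzero hpre
  · unfold retrieve_all_rolling_string_parts_py retrieve_all_rolling_string_parts_py_alt
    rw [if_neg (not_le.mpr hpos)]
    rw [PySem.List.foldl_append_singleton_eq_map
      (fun k => ((PySem.List.pyRange 0 (PySem.Int.floordiv (PySem.Str.len string) ngram) 1).map
        (fun i => PySem.Str.slice string (some (k + ngram * i)) (some (k + ngram * (i + 1))))).filter
        (fun r => PySem.Str.len r == ngram))]
    rw [List.nil_append]
    apply List.map_congr_left
    intro k hk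
    rw [PySem.List.mem_pyRange_one] at hk
    rw [pv_bucketA string ngram k hpos hk.1, pv_bucketB string ngram k hpos hk.1 hk.2]
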